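-- pv_equiv track=rewrite | github.com/NansyJourney/Time-Forest-project | src/ChangeDetection.py | confirm_consensus
-- ===== SOURCE A (Python) =====
-- def confirm_consensus(cps_pelt, cps_cusum, tolerance=5):
--     confirmed = []
--     for p_cp in cps_pelt:
--         for c_cp in cps_cusum:
--             if abs(p_cp - c_cp) <= tolerance:
--                 confirmed.append(p_cp)
--                 break
--     return confirmed
-- ===== SOURCE B (Python) =====
-- def confirm_consensus(cps_pelt, cps_cusum, tolerance=5):
--     # sort cusum once; per pelt point, binary-search the first cusum value >= p - tolerance
--     cs = sorted(cps_cusum)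
--     n = len(cs)
--     confirmed = []
--     for p in cps_pelt:
--         x = p - tolerance
--         lo, hi = 0, n
--         while lo < hi:
--             mid = (lo + hi) // 2
--             if cs[mid] < x:
--                 lo = mid + 1
--             else:
--                 hi = mid
--         if lo < n and cs[lo] <= p + tolerance:
--             confirmed.append(p)
--     return confirmed
-- ===== Notes on version B (the rewrite author's own statement) =====
-- stated objective: faster
-- what changed: Instead of scanning the whole cusum list for every pelt point, B sorts cusum once and binary-searches for the first value >= p - tolerance, checking it against p + tolerance.
import Mathlib
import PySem

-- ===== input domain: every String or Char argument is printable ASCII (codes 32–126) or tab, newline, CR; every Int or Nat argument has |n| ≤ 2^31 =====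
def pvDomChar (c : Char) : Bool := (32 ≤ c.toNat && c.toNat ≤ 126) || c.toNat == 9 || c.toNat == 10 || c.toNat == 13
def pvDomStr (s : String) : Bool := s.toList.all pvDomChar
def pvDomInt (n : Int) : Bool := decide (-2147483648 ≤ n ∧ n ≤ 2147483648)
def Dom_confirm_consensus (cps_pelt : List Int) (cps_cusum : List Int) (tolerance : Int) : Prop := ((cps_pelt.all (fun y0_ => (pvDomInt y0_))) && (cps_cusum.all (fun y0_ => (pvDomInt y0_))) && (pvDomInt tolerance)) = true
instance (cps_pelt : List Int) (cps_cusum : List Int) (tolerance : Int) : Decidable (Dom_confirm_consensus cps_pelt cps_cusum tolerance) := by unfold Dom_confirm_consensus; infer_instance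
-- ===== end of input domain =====

-- B replaces A's inner linear scan of cps_cusum by one sort of cps_cusum plus a binary
-- search per pelt point (objective: faster, asymptotic).

-- ===== PORT A =====
-- inner 'for c_cp in cps_cusum: … break' loop: true iff some c within tolerance is found
def ccInner (p_cp : Int) (tolerance : Int) : List Int → Bool
  | [] => false
  | c_cp :: rest => if |p_cp - c_cp| ≤ tolerance then true else ccInner p_cp tolerance rest

def confirm_consensus (cps_pelt : List Int) (cps_cusum : List Int) (tolerance : Int) : List Int :=
  cps_pelt.foldl (fun confirmed p_cp =>
    if ccInner p_cp tolerance cps_cusum then confirmed ++ [p_cp] else confirmed) []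

-- ===== PORT B =====
-- the 'while lo < hi' binary-search loop of Source B; mid is always in range
-- (lo ≤ mid < hi ≤ cs.length), so getD is exact for Python's cs[mid]
-- fuel makes the recursion structural; fuel = hi - lo suffices since hi - lo
-- strictly decreases each iteration (a totality guard only, not an algorithm change)
def bsLoop (cs : List Int) (x : Int) (lo hi : Nat) : Nat → Nat
  | 0 => lo
  | fuel + 1 =>
    if lo < hi then
      let mid := (lo + hi) / 2
      if cs.getD mid 0 < x then bsLoop cs x (mid + 1) hi fuel else bsLoop cs x lo mid fuel
    else lo

def confirm_consensus_alt (cps_pelt : List Int) (cps_cusum : List Int) (tolerance : Int) : List Int :=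
  let cs := PySem.List.sorted cps_cusum (fun c => c)
  let n := cs.length
  cps_pelt.foldl (fun confirmed p =>
    let lo := bsLoop cs (p - tolerance) 0 n n
    if lo < n ∧ cs.getD lo 0 ≤ p + tolerance then confirmed ++ [p] else confirmed) []

-- ===== PRECONDITION & SPEC =====
def Spec_confirm_consensus (cps_pelt : List Int) (cps_cusum : List Int) (tolerance : Int) (out : List Int) : Prop := out = confirm_consensus_alt cps_pelt cps_cusum tolerance
instance (cps_pelt : List Int) (cps_cusum : List Int) (tolerance : Int) (out : List Int) : Decidable (Spec_confirm_consensus cps_pelt cps_cusum tolerance out) := by unfold Spec_confirm_consensus; infer_instance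

-- ===== CLAIM (what is proved, stated in full; the proofs are below) =====
def Claim_equal_confirm_consensus : Prop := ∀ (cps_pelt : List Int) (cps_cusum : List Int) (tolerance : Int), Dom_confirm_consensus cps_pelt cps_cusum tolerance → Spec_confirm_consensus cps_pelt cps_cusum tolerance (confirm_consensus cps_pelt cps_cusum tolerance)

-- ===== LEMMAS AND PROOFS =====

theorem ccInner_eq_any (p tol : Int) (cs : List Int) :
    ccInner p tol cs = cs.any (fun c => decide (|p - c| ≤ tol)) := by
  induction cs with
  | nil => rfl
  | cons c rest ih =>
    simp only [ccInner, List.any_cons]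
    split_ifs with h <;> simp [h, ih]

theorem getD_mono (cs : List Int) (h : cs.Pairwise (· ≤ ·)) {i j : Nat}
    (hij : i ≤ j) (hj : j < cs.length) : cs.getD i 0 ≤ cs.getD j 0 := by
  rcases Nat.lt_or_ge i j with hlt | hge
  · rw [List.getD_eq_getElem _ _ (lt_of_le_of_lt hij hj), List.getD_eq_getElem _ _ hj]
    exact List.pairwise_iff_getElem.mp h i j _ _ hlt
  · have : i = j := le_antisymm hij hge
    subst this; exact le_refl _

theorem bsLoop_eq_step (cs : List Int) (x : Int) (lo hi fuel : Nat) (h : lo < hi) :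
    bsLoop cs x lo hi (fuel + 1) =
      if cs.getD ((lo + hi) / 2) 0 < x then bsLoop cs x ((lo + hi) / 2 + 1) hi fuel
      else bsLoop cs x lo ((lo + hi) / 2) fuel := by
  simp [bsLoop, h]

theorem bsLoop_eq_stop (cs : List Int) (x : Int) (lo hi fuel : Nat) (h : ¬ lo < hi) :
    bsLoop cs x lo hi fuel = lo := by
  cases fuel <;> simp [bsLoop, h]

theorem bsLoop_spec (cs : List Int) (x : Int) (hmono : cs.Pairwise (· ≤ ·)) :
    ∀ (fuel lo hi : Nat), hi - lo ≤ fuel → lo ≤ hi → hi ≤ cs.length →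
    (∀ i, i < lo → cs.getD i 0 < x) →
    (∀ i, hi ≤ i → i < cs.length → x ≤ cs.getD i 0) →
    (∀ i, i < bsLoop cs x lo hi fuel → cs.getD i 0 < x) ∧
    (∀ i, bsLoop cs x lo hi fuel ≤ i → i < cs.length → x ≤ cs.getD i 0) ∧
    bsLoop cs x lo hi fuel ≤ hi := by
  intro fuel
  induction fuel with
  | zero =>
    intro lo hi hk hle hhi hlo hhi'
    have h : ¬ lo < hi := by omega
    rw [bsLoop_eq_stop cs x lo hi 0 h]
    exact ⟨hlo, fun i hli hil => hhi' i (by omega) hil, hle⟩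
  | succ fuel ih =>
    intro lo hi hk hle hhi hlo hhi'
    by_cases hlt : lo < hi
    · rw [bsLoop_eq_step cs x lo hi fuel hlt]
      have hmid0 : lo ≤ (lo + hi) / 2 := by omega
      have hmid1 : (lo + hi) / 2 < hi := by omega
      by_cases hc : cs.getD ((lo + hi) / 2) 0 < x
      · rw [if_pos hc]
        have := ih ((lo + hi) / 2 + 1) hi (by omega) (by omega) hhi
          (fun i hi' => by
            rcases Nat.lt_or_ge i lo with h | h
            · exact hlo i h
            · exact lt_of_le_of_lt (getD_mono cs hmono (by omega) (by omega)) hc)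
          hhi'
        exact ⟨this.1, this.2.1, this.2.2⟩
      · rw [if_neg hc]
        have hx : x ≤ cs.getD ((lo + hi) / 2) 0 := le_of_not_gt hc
        have := ih lo ((lo + hi) / 2) (by omega) (by omega) (by omega) hlo
          (fun i hmi hil => le_trans hx (getD_mono cs hmono hmi hil))
        exact ⟨this.1, this.2.1, by omega⟩
    · rw [bsLoop_eq_stop cs x lo hi (fuel + 1) hlt]
      exact ⟨hlo, fun i hli hil => hhi' i (by omega) hil, hle⟩

-- B's per-point test equals "some cusum value within tolerance"
theorem bs_check_iff (cps_cusum : List Int) (p tol : Int) :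
    (bsLoop (PySem.List.sorted cps_cusum (fun c => c)) (p - tol) 0
        (PySem.List.sorted cps_cusum (fun c => c)).length
        (PySem.List.sorted cps_cusum (fun c => c)).length <
        (PySem.List.sorted cps_cusum (fun c => c)).length ∧
      (PySem.List.sorted cps_cusum (fun c => c)).getD
        (bsLoop (PySem.List.sorted cps_cusum (fun c => c)) (p - tol) 0
          (PySem.List.sorted cps_cusum (fun c => c)).length
          (PySem.List.sorted cps_cusum (fun c => c)).length) 0 ≤ p + tol)
    ↔ ∃ c ∈ cps_cusum, |p - c| ≤ tol := by
  set cs := PySem.List.sorted cps_cusum (fun c => c) with hcs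
  have hmono : cs.Pairwise (· ≤ ·) := PySem.List.sorted_pairwise cps_cusum (fun c => c)
  set lo := bsLoop cs (p - tol) 0 cs.length cs.length with hlo
  obtain ⟨h1, h2, _⟩ := bsLoop_spec cs (p - tol) hmono cs.length 0 cs.length (by omega)
    (Nat.zero_le _) (le_refl _)
    (fun i hi => absurd hi (Nat.not_lt_zero i)) (fun i hi hi' => absurd hi' (by omega))
  constructor
  · rintro ⟨hlt, hle⟩
    refine ⟨cs.getD lo 0, ?_, ?_⟩
    · rw [← PySem.List.mem_sorted cps_cusum (fun c => c) false, ← hcs]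
      rw [List.getD_eq_getElem _ _ hlt]
      exact List.getElem_mem hlt
    · have := h2 lo (le_refl _) hlt
      rw [abs_le]; omega
  · rintro ⟨c, hc, habs⟩
    have hc' : c ∈ cs := (PySem.List.mem_sorted cps_cusum (fun c => c) false c).mpr hc
    obtain ⟨j, hj, hje⟩ := List.mem_iff_getElem.mp hc'
    rw [abs_le] at habs
    have hjlo : lo ≤ j := by
      by_contra h
      have := h1 j (by omega)
      rw [List.getD_eq_getElem _ _ hj, hje] at this
      omega
    have hlt : lo < cs.length := by omega
    refine ⟨hlt, ?_⟩
    have := getD_mono cs hmono hjlo hj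
    rw [List.getD_eq_getElem _ _ hj, hje] at this
    omega

-- ===== VERDICT (by name: the statement is the Claim_ definition above) =====
theorem confirm_consensus_spec : Claim_equal_confirm_consensus := by
  unfold Claim_equal_confirm_consensus
  intro cps_pelt cps_cusum tolerance _
  unfold Spec_confirm_consensus confirm_consensus confirm_consensus_alt
  rw [PySem.List.foldl_append_if_eq_filter (fun p => ccInner p tolerance cps_cusum) cps_pelt []]
  rw [PySem.List.foldl_append_ite_eq_filter
    (fun p => bsLoop (PySem.List.sorted cps_cusum (fun c => c)) (p - tolerance) 0
        (PySem.List.sorted cps_cusum (fun c => c)).length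
        (PySem.List.sorted cps_cusum (fun c => c)).length <
        (PySem.List.sorted cps_cusum (fun c => c)).length ∧
      (PySem.List.sorted cps_cusum (fun c => c)).getD
        (bsLoop (PySem.List.sorted cps_cusum (fun c => c)) (p - tolerance) 0
          (PySem.List.sorted cps_cusum (fun c => c)).length
          (PySem.List.sorted cps_cusum (fun c => c)).length) 0 ≤ p + tolerance)
    cps_pelt []]
  simp only [List.nil_append]
  apply List.filter_congr
  intro p _
  rw [ccInner_eq_any]
  rw [decide_eq_decide.mpr (bs_check_iff cps_cusum p tolerance)]
  rw [Bool.eq_iff_iff]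
  simp [List.any_eq_true]
  infer_instance
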